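-- pv_equiv track=rewrite | github.com/atkandi111/16-Tile-Mahjong-Bot | Mahjong 5.py | Decompose_Meld
-- ===== SOURCE A (Python) =====
-- from collections import Counter
-- from itertools import combinations, chain
--
-- def Group_Sets(hand):
--     freq = Counter(hand)
--     pair, pong, chow = [], [], []
--     pair = [[x] * 2 for x in freq if freq[x] > 1]
--     pong = [[x] * 3 for x in freq if freq[x] > 2]
--     chow = []
--     for item in freq:
--         suit, unit = item[0], item[1]
--         if unit.isalpha():
--             continue
--
--         seqn = [0, 1, 2]
--         seqn = [x + int(unit) for x in seqn]
--         seqn = [suit + str(x) for x in seqn]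
--
--         chow += [seqn] * min([freq[x] for x in seqn])
--     return pair, pong, chow
--
-- def Decompose_Meld(hand, freq):
--     #include eyes
--     #then try to merge with check_win
--     pair, pong, chow = Group_Sets(hand)
--     meld_count = {}
--     for test_card in set(hand):
--         temp = hand.copy()
--         temp.remove(test_card)
--
--         length = len(hand) // 3
--         while length >= 0:
--             for case in combinations(pong + chow, length):
--                 if (Counter(chain(*case)) - Counter(temp)):
--                     continue
--                 meld_count[test_card] = length
--                 length = 0
--                 break
--             length = length - 1
--
--     max_count = max(meld_count.values())
--     return [x for x in hand if meld_count[x] == max_count]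
-- ===== SOURCE B (Python) =====
-- from collections import Counter
--
-- def _best(melds, i, rem):
--     # max number of disjoint melds choosable from melds[i:] inside multiset rem
--     if i == len(melds):
--         return 0
--     res = _best(melds, i + 1, rem)
--     need = Counter(melds[i])
--     if all(rem[t] >= c for t, c in need.items()):
--         for t, c in need.items():
--             rem[t] -= c
--         take = 1 + _best(melds, i + 1, rem)
--         for t, c in need.items():
--             rem[t] += c
--         if take > res:
--             res = take
--     return res
--
-- def Decompose_Meld(hand, freq):
--     cnt = Counter(hand)
--     melds = [[t] * 3 for t in cnt if cnt[t] > 2]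
--     for t in cnt:
--         if not t[1].isalpha():
--             run = [t[0] + str(int(t[1]) + i) for i in range(3)]
--             melds += [run] * min(cnt[x] for x in run)
--     score = {}
--     for t in cnt:
--         rem = cnt.copy()
--         rem[t] -= 1
--         score[t] = _best(melds, 0, rem)
--     top = max(score.values())
--     return [x for x in hand if score[x] == top]
-- ===== Notes on version B (the rewrite author's own statement) =====
-- stated objective: faster
-- what changed: A scans meld-set sizes downward, enumerating all itertools.combinations of the pong/chow pool at each size until one fits the reduced hand; B replaces that enumeration by a single include/exclude branch-and-bound recursion over the meld list that maintains the remaining tile counts incrementally and returns the maximum number of disjoint fitting melds directly.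
import Mathlib
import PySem

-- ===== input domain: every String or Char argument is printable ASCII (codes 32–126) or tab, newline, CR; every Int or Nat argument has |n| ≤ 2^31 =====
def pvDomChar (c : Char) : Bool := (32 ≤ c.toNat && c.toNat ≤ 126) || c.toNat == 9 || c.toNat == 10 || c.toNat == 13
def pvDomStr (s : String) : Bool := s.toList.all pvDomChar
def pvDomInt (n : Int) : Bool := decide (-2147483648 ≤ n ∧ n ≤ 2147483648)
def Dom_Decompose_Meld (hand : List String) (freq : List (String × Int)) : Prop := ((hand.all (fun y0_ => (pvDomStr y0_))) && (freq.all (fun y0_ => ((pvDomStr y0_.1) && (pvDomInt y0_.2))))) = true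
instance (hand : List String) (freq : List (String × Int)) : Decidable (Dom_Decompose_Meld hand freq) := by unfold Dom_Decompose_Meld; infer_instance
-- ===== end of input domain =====

-- B replaces A's descending-size enumeration of all meld combinations by a pruned
-- include/exclude recursion over the meld pool (measured faster); return values proved equal.


-- ===== PORT A =====

-- the chow element built for one Counter key: suit, unit = item[0], item[1];
-- [seqn] * min([freq[x] for x in seqn]).  The 'A' default of pyGetD and the 0 default of
-- ofChars? are reached only outside Pre_ (where the Python raises IndexError / ValueError).
def pyChow (freq : PySem.Dict String Int) (item : String) : List (List String) :=
  let suit := PySem.List.pyGetD item.toList 0 'A'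
  let unit := PySem.List.pyGetD item.toList 1 'A'
  let seqn : List Int := ([0, 1, 2] : List Int).map (fun x => x + (PySem.Int.ofChars? [unit]).getD 0)
  let seqn2 : List String := seqn.map (fun x => String.mk ([suit] ++ PySem.Int.toChars x))
  PySem.List.pyRepeat [seqn2]
    ((PySem.List.min? (seqn2.map (fun x => freq.getD x 0)) (fun v => v)).getD 0)

-- Group_Sets(hand): pair/pong comprehensions over the Counter's keys, then the chow loop.
def pyGroup_Sets (hand : List String) :
    List (List String) × List (List String) × List (List String) :=
  let freq := PySem.Dict.counter hand
  let pair := (freq.keys.filter (fun x => 1 < freq.getD x 0)).map (fun x => PySem.List.pyRepeat [x] 2)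
  let pong := (freq.keys.filter (fun x => 2 < freq.getD x 0)).map (fun x => PySem.List.pyRepeat [x] 3)
  let chow := freq.keys.foldl (fun chow item =>
    if PySem.Chars.isalpha (PySem.List.pyGetD item.toList 1 'A') then chow   -- continue
    else chow ++ pyChow freq item) []
  (pair, pong, chow)

-- 'if (Counter(chain(*case)) - Counter(temp)): continue' — the Counter difference keeps only the
-- positive entries, so it is empty iff every chained tile count is ≤ its count in temp (exact).
def pyFits (case : List (List String)) (temp : List String) : Bool :=
  (PySem.Dict.counter case.flatten).items.all
    (fun p => p.2 ≤ (PySem.Dict.counter temp).getD p.1 0)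

-- the 'while length >= 0' loop: first (largest) length whose combinations contain a fitting case.
-- At length 0 combinations(pool, 0) = [[]] and the empty case always fits, so the loop records 0.
def pySearch (pool : List (List String)) (temp : List String) : Nat → Int
  | 0 => 0
  | n + 1 =>
    if (PySem.List.combinations pool (n + 1)).any (fun case => pyFits case temp) then
      ((n : Int) + 1)
    else pySearch pool temp n

def Decompose_Meld (hand : List String) (freq : List (String × Int)) : List String :=
  let gs := pyGroup_Sets hand
  let pool := gs.2.1 ++ gs.2.2
  -- for test_card in set(hand): the Python set order is arbitrary; each key's value is computed
  -- independently, so building meld_count in first-occurrence order is exact for the result.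
  let meld_count := (PySem.Set.ofList hand).foldl (fun d test_card =>
    let temp := (PySem.List.remove? hand test_card).getD hand   -- test_card ∈ hand, so remove? succeeds
    d.insert test_card (pySearch pool temp (hand.length / 3))) PySem.Dict.empty
  -- max(meld_count.values()): raises ValueError on an empty hand — excluded by Pre_
  let max_count := (PySem.List.max? meld_count.values (fun v => v)).getD 0
  hand.filter (fun x => meld_count.getD x 0 == max_count)

-- ===== PORT B =====

-- run = [t[0] + str(int(t[1]) + i) for i in range(3)]
def pvRun (t : String) : List String :=
  (PySem.List.pyRange 0 3 1).map (fun i =>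
    String.mk ([PySem.List.pyGetD t.toList 0 'A'] ++
      PySem.Int.toChars ((PySem.Int.ofChars? [PySem.List.pyGetD t.toList 1 'A']).getD 0 + i)))

-- [run] * min(cnt[x] for x in run)
def pvChowOf (cnt : PySem.Dict String Int) (t : String) : List (List String) :=
  PySem.List.pyRepeat [pvRun t]
    ((PySem.List.min? ((pvRun t).map (fun x => cnt.getD x 0)) (fun v => v)).getD 0)

-- _best(melds, i, rem): skip melds[i], or (if it fits in rem) take it, updating rem in place.
def pvBest : List (List String) → PySem.Dict String Int → Int
  | [], _ => 0
  | m :: ms, rem =>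
    let res := pvBest ms rem
    let need := PySem.Dict.counter m
    if need.items.all (fun p => p.2 ≤ rem.getD p.1 0) then
      let rem' := need.items.foldl (fun d p => d.modify p.1 0 (fun v => v - p.2)) rem
      max res (1 + pvBest ms rem')   -- 'if take > res: res = take' is max
    else res

def Decompose_Meld_alt (hand : List String) (freq : List (String × Int)) : List String :=
  let cnt := PySem.Dict.counter hand
  let melds0 := (cnt.keys.filter (fun t => 2 < cnt.getD t 0)).map (fun t => PySem.List.pyRepeat [t] 3)
  let melds := cnt.keys.foldl (fun acc t =>
    if !(PySem.Chars.isalpha (PySem.List.pyGetD t.toList 1 'A')) then acc ++ pvChowOf cnt t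
    else acc) melds0
  let score := cnt.keys.foldl (fun d t =>
    d.insert t (pvBest melds (cnt.modify t 0 (fun v => v - 1)))) PySem.Dict.empty
  let top := (PySem.List.max? score.values (fun v => v)).getD 0
  hand.filter (fun x => score.getD x 0 == top)

-- ===== PRECONDITION & SPEC =====

-- Pre_ excludes exactly the inputs where the Python A raises: an empty hand (max() of no values,
-- ValueError) and any hand tile shorter than 2 chars (IndexError on item[1]) or whose second char
-- is neither alphabetic nor a digit (int(unit) ValueError).
def Pre_Decompose_Meld (hand : List String) (freq : List (String × Int)) : Prop :=
  hand ≠ [] ∧ ∀ s ∈ hand, 2 ≤ s.toList.length ∧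
    (PySem.Chars.isalpha (s.toList.getD 1 'A') = true ∨ PySem.Chars.isdigit (s.toList.getD 1 'A') = true)
instance (hand : List String) (freq : List (String × Int)) : Decidable (Pre_Decompose_Meld hand freq) := by
  unfold Pre_Decompose_Meld; infer_instance

def pvWitness_Decompose_Meld : List String × (List (String × Int)) := (["C1", "C1"], [])

def Spec_Decompose_Meld (hand : List String) (freq : List (String × Int)) (out : List String) : Prop := out = Decompose_Meld_alt hand freq
instance (hand : List String) (freq : List (String × Int)) (out : List String) : Decidable (Spec_Decompose_Meld hand freq out) := by unfold Spec_Decompose_Meld; infer_instance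

-- ===== CLAIM (what is proved, stated in full; the proofs are below) =====
def Claim_equal_Decompose_Meld : Prop := ∀ (hand : List String) (freq : List (String × Int)), Dom_Decompose_Meld hand freq → Pre_Decompose_Meld hand freq → Spec_Decompose_Meld hand freq (Decompose_Meld hand freq)

-- ===== LEMMAS AND PROOFS =====

-- the mathematical value both searches compute: max number of disjoint melds from `pool`
-- (as a sub-multiset) whose tiles fit in the available counts `f`
def bestF : List (List String) → (String → Int) → Nat
  | [], _ => 0
  | m :: ms, f =>
    let r := bestF ms f
    if m.all (fun t => (m.count t : Int) ≤ f t) then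
      max r (1 + bestF ms (fun t => f t - (m.count t : Int)))
    else r

def tcnt (temp : List String) : String → Int := fun t => (temp.count t : Int)


lemma pyFits_iff (c : List (List String)) (temp : List String) :
    pyFits c temp = true ↔ ∀ t, (c.flatten.count t : Int) ≤ tcnt temp t := by
  unfold pyFits tcnt
  rw [List.all_eq_true]
  constructor
  · intro h t
    by_cases ht : t ∈ c.flatten
    · have := h (t, (c.flatten.count t : Int)) (by
        rw [PySem.Dict.items_counter]
        exact List.mem_map.mpr ⟨t, (PySem.Set.mem_ofList _ _).mpr ht, rfl⟩)
      simpa [PySem.Dict.getD_counter] using this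
    · simp [List.count_eq_zero_of_not_mem ht]
  · intro h p hp
    rw [PySem.Dict.items_counter] at hp
    obtain ⟨k, hk, rfl⟩ := List.mem_map.mp hp
    simpa [PySem.Dict.getD_counter] using h k

lemma bestF_cons_le (m : List String) (ms : List (List String)) (f : String → Int) :
    bestF ms f ≤ bestF (m :: ms) f := by
  simp only [bestF]
  split <;> simp

lemma bestF_le_up (pool : List (List String)) (f : String → Int) :
    ∀ (c : List (List String)), c.Sublist pool → (∀ t, (c.flatten.count t : Int) ≤ f t) →
      c.length ≤ bestF pool f := by
  induction pool generalizing f with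
  | nil => intro c hc _; simp [List.sublist_nil.mp hc, bestF]
  | cons m ms ih =>
    intro c hc hfit
    rcases List.sublist_cons_iff.mp hc with h | ⟨r, rfl, hr⟩
    · exact le_trans (ih f c h hfit) (bestF_cons_le m ms f)
    · have hm : ∀ t, (m.count t : Int) ≤ f t := by
        intro t
        have := hfit t
        simp only [List.flatten_cons, List.count_append] at this
        push_cast at this
        have h0 : (0 : Int) ≤ (r.flatten.count t : Int) := by positivity
        omega
      have hr' : ∀ t, (r.flatten.count t : Int) ≤ f t - (m.count t : Int) := by
        intro t
        have := hfit t
        simp only [List.flatten_cons, List.count_append] at this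
        push_cast at this
        omega
      simp only [bestF]
      rw [if_pos (by rw [List.all_eq_true]; intro t _; simpa using hm t)]
      have := ih (fun t => f t - (m.count t : Int)) r hr hr'
      simp only [List.length_cons]
      omega

lemma bestF_exists (pool : List (List String)) (f : String → Int) (hf0 : ∀ t, 0 ≤ f t) :
    ∃ c : List (List String), c.Sublist pool ∧ c.length = bestF pool f ∧
      ∀ t, (c.flatten.count t : Int) ≤ f t := by
  induction pool generalizing f with
  | nil => exact ⟨[], by simp, by simp [bestF], by intro t; simpa using hf0 t⟩
  | cons m ms ih =>
    simp only [bestF]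
    split
    · rename_i hall
      rw [List.all_eq_true] at hall
      rcases Nat.le_total (1 + bestF ms (fun t => f t - (m.count t : Int))) (bestF ms f) with h | h
      · obtain ⟨c, hc, hl, hf⟩ := ih f hf0
        exact ⟨c, hc.cons m, by omega, hf⟩
      · obtain ⟨c, hc, hl, hf⟩ := ih (fun t => f t - (m.count t : Int)) (by
          intro t
          show 0 ≤ f t - (m.count t : Int)
          by_cases ht : t ∈ m
          · have := hall t ht; simp at this; omega
          · have := hf0 t; simp [List.count_eq_zero_of_not_mem ht]; omega)
        refine ⟨m :: c, List.cons_sublist_cons.mpr hc, by simp [hl]; omega, ?_⟩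
        intro t
        have h1 : (m.count t : Int) ≤ f t := by
          by_cases ht : t ∈ m
          · simpa using hall t ht
          · simpa [List.count_eq_zero_of_not_mem ht] using hf0 t
        have h2 := hf t
        simp only [List.flatten_cons, List.count_append]
        push_cast
        omega
    · exact let ⟨c, hc, hl, hf⟩ := ih f hf0; ⟨c, hc.cons m, hl, hf⟩

lemma any_fits_iff (pool : List (List String)) (temp : List String) (L : Nat) :
    ((PySem.List.combinations pool L).any (fun c => pyFits c temp) = true) ↔
      L ≤ bestF pool (tcnt temp) := by
  rw [List.any_eq_true]
  constructor
  · rintro ⟨c, hc, hfit⟩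
    obtain ⟨hsub, hlen⟩ := (PySem.List.mem_combinations_iff pool L c).mp hc
    exact hlen ▸ bestF_le_up pool (tcnt temp) c hsub ((pyFits_iff c temp).mp hfit)
  · intro hL
    obtain ⟨c, hc, hl, hf⟩ := bestF_exists pool (tcnt temp) (fun t => by simp [tcnt])
    refine ⟨c.take L, (PySem.List.mem_combinations_iff _ _ _).mpr
      ⟨(List.take_sublist L c).trans hc, by rw [List.length_take]; omega⟩, ?_⟩
    rw [pyFits_iff]
    intro t
    have hsub : (c.take L).flatten.Sublist c.flatten := (List.take_sublist L c).flatten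
    have := List.Sublist.count_le (l₂ := c.flatten) t hsub
    have := hf t
    omega

lemma pySearch_eq (pool : List (List String)) (temp : List String) (n : Nat)
    (h : bestF pool (tcnt temp) ≤ n) :
    pySearch pool temp n = (bestF pool (tcnt temp) : Int) := by
  induction n with
  | zero => simp [pySearch]; omega
  | succ k ih =>
    simp only [pySearch]
    by_cases hany : (PySem.List.combinations pool (k + 1)).any (fun case => pyFits case temp) = true
    · rw [if_pos hany]
      have := (any_fits_iff pool temp (k + 1)).mp hany
      have : bestF pool (tcnt temp) = k + 1 := by omega
      simp [this]
    · rw [if_neg hany]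
      have hk : bestF pool (tcnt temp) ≤ k := by
        by_contra hcon
        exact hany ((any_fits_iff pool temp (k + 1)).mpr (by omega))
      exact ih hk

lemma bestF_bound (pool : List (List String)) (temp : List String)
    (h3 : ∀ m ∈ pool, m.length = 3) :
    3 * bestF pool (tcnt temp) ≤ temp.length := by
  obtain ⟨c, hc, hl, hf⟩ := bestF_exists pool (tcnt temp) (fun t => by simp [tcnt])
  have hlen : c.flatten.length = 3 * c.length := by
    simp [List.length_flatten]
    rw [List.map_congr_left (fun m hm => h3 m (hc.mem hm))]
    simp [List.sum_replicate, Nat.mul_comm]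
  have hsub : c.flatten.Subperm temp := by
    apply List.subperm_ext_iff.mpr
    intro a _
    have := hf a
    simp only [tcnt] at this
    exact_mod_cast this
  have := hsub.length_le
  omega

lemma foldl_modify_sub (ks : List String) (g : String → Int) (rem : PySem.Dict String Int)
    (t : String) (hnd : ks.Nodup) :
    ((ks.map (fun k => (k, g k))).foldl (fun d p => d.modify p.1 0 (fun v => v - p.2)) rem).getD t 0
      = rem.getD t 0 - (if t ∈ ks then g t else 0) := by
  induction ks generalizing rem with
  | nil => simp
  | cons k ks ih =>
    simp only [List.map_cons, List.foldl_cons]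
    rw [ih _ (hnd.sublist (List.sublist_cons_self k ks))]
    rw [PySem.Dict.getD_modify]
    by_cases hk : t = k
    · subst hk
      have : t ∉ ks := (List.nodup_cons.mp hnd).1
      simp [this]
    · simp [hk, List.mem_cons]

lemma sub_items_getD (m : List String) (rem : PySem.Dict String Int) (t : String) :
    (((PySem.Dict.counter m).items).foldl (fun d p => d.modify p.1 0 (fun v => v - p.2)) rem).getD t 0
      = rem.getD t 0 - (m.count t : Int) := by
  rw [PySem.Dict.items_counter]
  rw [foldl_modify_sub (PySem.Set.ofList m) (fun k => (m.count k : Int)) rem t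
    (PySem.Set.nodup_ofList m)]
  by_cases ht : t ∈ m
  · simp [(PySem.Set.mem_ofList _ _).mpr ht]
  · have h1 : t ∉ PySem.Set.ofList m := fun hc => ht ((PySem.Set.mem_ofList _ _).mp hc)
    simp [h1, List.count_eq_zero_of_not_mem ht]

lemma pvBest_eq (ms : List (List String)) (rem : PySem.Dict String Int) :
    pvBest ms rem = (bestF ms (fun t => rem.getD t 0) : Int) := by
  induction ms generalizing rem with
  | nil => simp [pvBest, bestF]
  | cons m ms ih =>
    simp only [pvBest, bestF]
    have hcond : ((PySem.Dict.counter m).items.all (fun p => p.2 ≤ rem.getD p.1 0))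
        = m.all (fun t => (m.count t : Int) ≤ rem.getD t 0) := by
      rw [PySem.Dict.items_counter]
      simp only [List.all_map]
      apply Bool.eq_iff_iff.mpr
      simp only [List.all_eq_true]
      constructor
      · intro h t ht
        simpa using h t ((PySem.Set.mem_ofList _ _).mpr ht)
      · intro h t ht
        simpa using h t ((PySem.Set.mem_ofList _ _).mp ht)
    rw [hcond]
    split
    · have hrem' : (fun t => (((PySem.Dict.counter m).items).foldl
          (fun d p => d.modify p.1 0 (fun v => v - p.2)) rem).getD t 0)
          = fun t => rem.getD t 0 - (m.count t : Int) := funext (fun t => sub_items_getD m rem t)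
      rw [ih, ih, hrem']
      push_cast
      rfl
    · exact ih rem

-- ----- assembly: the two meld pools are the same list and the two score dicts are equal -----

-- B's meld list as an expression of hand (proof-layer abbreviation of the body of Decompose_Meld_alt)
def pvMeldsB (hand : List String) : List (List String) :=
  (PySem.Dict.counter hand).keys.foldl (fun acc t =>
    if !(PySem.Chars.isalpha (PySem.List.pyGetD t.toList 1 'A')) then
      acc ++ pvChowOf (PySem.Dict.counter hand) t
    else acc)
    (((PySem.Dict.counter hand).keys.filter (fun t => 2 < (PySem.Dict.counter hand).getD t 0)).map
      (fun t => PySem.List.pyRepeat [t] 3))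

lemma foldl_if_append1 (l : List String) (p : String → Bool) (g : String → List (List String))
    (init : List (List String)) :
    l.foldl (fun acc x => if p x = true then acc else acc ++ g x) init
      = init ++ l.flatMap (fun x => if p x then [] else g x) := by
  induction l generalizing init with
  | nil => simp
  | cons x xs ih =>
    simp only [List.foldl_cons, List.flatMap_cons]
    by_cases h : p x = true
    · rw [if_pos h, if_pos h, ih, List.nil_append]
    · rw [if_neg h, if_neg h, ih]
      simp [List.append_assoc]

lemma foldl_if_append2 (l : List String) (p : String → Bool) (g : String → List (List String))
    (init : List (List String)) :
    l.foldl (fun acc x => if (!p x) = true then acc ++ g x else acc) init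
      = init ++ l.flatMap (fun x => if p x then [] else g x) := by
  induction l generalizing init with
  | nil => simp
  | cons x xs ih =>
    simp only [List.foldl_cons, List.flatMap_cons]
    by_cases h : p x = true
    · rw [if_neg (by simp [h]), if_pos h, ih, List.nil_append]
    · rw [if_pos (by simp [h]), if_neg h, ih]
      simp [List.append_assoc]

lemma chow_item_eq (freq : PySem.Dict String Int) (item : String) :
    pyChow freq item = pvChowOf freq item := by
  have hseq : (([0, 1, 2] : List Int).map
        (fun x => x + (PySem.Int.ofChars? [PySem.List.pyGetD item.toList 1 'A']).getD 0)).map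
        (fun x => String.mk ([PySem.List.pyGetD item.toList 0 'A'] ++ PySem.Int.toChars x))
      = pvRun item := by
    simp only [pvRun]
    rw [show PySem.List.pyRange 0 3 1 = [0, 1, 2] from rfl, List.map_map]
    apply List.map_congr_left
    intro a ha
    simp only [Function.comp]
    rw [Int.add_comm]
  simp only [pyChow, pvChowOf]
  rw [hseq]

lemma pool_eq (hand : List String) :
    (pyGroup_Sets hand).2.1 ++ (pyGroup_Sets hand).2.2 = pvMeldsB hand := by
  have h21 : (pyGroup_Sets hand).2.1
      = ((PySem.Dict.counter hand).keys.filter (fun x => 2 < (PySem.Dict.counter hand).getD x 0)).map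
        (fun x => PySem.List.pyRepeat [x] 3) := rfl
  have h22 : (pyGroup_Sets hand).2.2
      = (PySem.Dict.counter hand).keys.foldl (fun chow item =>
          if PySem.Chars.isalpha (PySem.List.pyGetD item.toList 1 'A') then chow
          else chow ++ pyChow (PySem.Dict.counter hand) item) [] := rfl
  rw [h21, h22]
  simp only [pvMeldsB]
  rw [foldl_if_append1 _ (fun item => PySem.Chars.isalpha (PySem.List.pyGetD item.toList 1 'A'))
    (fun item => pyChow (PySem.Dict.counter hand) item)]
  rw [foldl_if_append2 _ (fun t => PySem.Chars.isalpha (PySem.List.pyGetD t.toList 1 'A'))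
    (fun t => pvChowOf (PySem.Dict.counter hand) t)]
  have hflat : (PySem.Dict.counter hand).keys.flatMap (fun x =>
        if PySem.Chars.isalpha (PySem.List.pyGetD x.toList 1 'A') then []
        else pyChow (PySem.Dict.counter hand) x)
      = (PySem.Dict.counter hand).keys.flatMap (fun x =>
        if PySem.Chars.isalpha (PySem.List.pyGetD x.toList 1 'A') then []
        else pvChowOf (PySem.Dict.counter hand) x) :=
    List.flatMap_congr (fun t _ => by rw [chow_item_eq])
  rw [hflat, List.nil_append]

lemma melds_len3 (hand : List String) : ∀ m ∈ pvMeldsB hand, m.length = 3 := by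
  simp only [pvMeldsB]
  rw [foldl_if_append2 _ (fun t => PySem.Chars.isalpha (PySem.List.pyGetD t.toList 1 'A'))
    (fun t => pvChowOf (PySem.Dict.counter hand) t)]
  intro m hm
  rcases List.mem_append.mp hm with h | h
  · obtain ⟨x, _, rfl⟩ := List.mem_map.mp h
    rw [PySem.List.pyRepeat_singleton]
    simp
  · obtain ⟨t, _, hmem⟩ := List.mem_flatMap.mp h
    by_cases ha : PySem.Chars.isalpha (PySem.List.pyGetD t.toList 1 'A')
    · simp [ha] at hmem
    · rw [if_neg (by simp [ha])] at hmem
      simp only [pvChowOf, PySem.List.pyRepeat_singleton] at hmem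
      rw [List.eq_of_mem_replicate hmem]
      simp [pvRun]

lemma value_eq (hand : List String) (t : String) (ht : t ∈ hand) :
    pySearch ((pyGroup_Sets hand).2.1 ++ (pyGroup_Sets hand).2.2)
      ((PySem.List.remove? hand t).getD hand) (hand.length / 3)
    = pvBest (pvMeldsB hand) ((PySem.Dict.counter hand).modify t 0 (fun v => v - 1)) := by
  have hrem : (PySem.List.remove? hand t).getD hand = hand.erase t := by
    rw [PySem.List.remove?_eq_some_erase]
    · rfl
    · exact ht
  have h1 : 1 ≤ hand.count t := List.count_pos_iff.mpr ht
  have hfun : (fun x => ((PySem.Dict.counter hand).modify t 0 (fun v => v - 1)).getD x 0)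
      = tcnt (hand.erase t) := by
    funext x
    rw [PySem.Dict.getD_modify]
    simp only [PySem.Dict.getD_counter, tcnt]
    by_cases hx : x = t
    · subst hx
      rw [if_pos rfl, List.count_erase_self, Nat.cast_sub h1, Nat.cast_one]
    · rw [if_neg hx, List.count_erase_of_ne hx]
  rw [hrem, pool_eq hand, pvBest_eq, hfun]
  apply pySearch_eq
  have hb := bestF_bound (pvMeldsB hand) (hand.erase t) (melds_len3 hand)
  have hl : (hand.erase t).length = hand.length - 1 := List.length_erase_of_mem ht
  have hpos : 1 ≤ hand.length := List.length_pos_of_mem ht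
  omega

-- an insert loop over distinct fresh keys builds exactly the association list of its value function
lemma items_insert_loop (l : List String) (hnd : l.Nodup) (v : String → Int) :
    (l.foldl (fun d t => d.insert t (v t)) PySem.Dict.empty).items = l.map (fun t => (t, v t)) := by
  have h := PySem.Dict.items_foldl_insert_fresh (k := fun (t : String) => t) (v := v) (l := l)
    (d := PySem.Dict.empty) (fun a _ => PySem.Dict.contains_empty a) (by simpa using hnd)
  simpa using h

lemma dicts_eq (hand : List String) :
    ((PySem.Set.ofList hand).foldl (fun d test_card =>
      d.insert test_card (pySearch ((pyGroup_Sets hand).2.1 ++ (pyGroup_Sets hand).2.2)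
        ((PySem.List.remove? hand test_card).getD hand) (hand.length / 3))) PySem.Dict.empty)
    = ((PySem.Dict.counter hand).keys.foldl (fun d t =>
      d.insert t (pvBest (pvMeldsB hand)
        ((PySem.Dict.counter hand).modify t 0 (fun v => v - 1)))) PySem.Dict.empty) := by
  apply PySem.Dict.ext
  rw [PySem.Dict.keys_counter]
  rw [items_insert_loop _ (PySem.Set.nodup_ofList hand) _]
  rw [items_insert_loop _ (PySem.Set.nodup_ofList hand) _]
  apply List.map_congr_left
  intro t htm
  rw [value_eq hand t ((PySem.Set.mem_ofList _ _).mp htm)]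

theorem Decompose_Meld_spec : Claim_equal_Decompose_Meld := by
  intro hand freq _ _
  show Decompose_Meld hand freq = Decompose_Meld_alt hand freq
  have h := dicts_eq hand
  simp only [pvMeldsB] at h
  simp only [Decompose_Meld, Decompose_Meld_alt]
  rw [h]
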